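-- pv_equiv track=rewrite | github.com/Akinana22/NS_Auto_Paint | core/scheduling/optimizer.py | _snake_sort_points
-- ===== SOURCE A (Python) =====
-- from typing import List, Tuple, Optional
--
-- def _snake_sort_points(points: List[Tuple[int, int]]) -> List[Tuple[int, int]]:
--     """
--     简单蛇形排序：按 y 升序，偶数行 x 升序，奇数行 x 降序。
--     用于没有上下文时的初始排序（如评估时第一个颜色）。
--     """
--     if not points:
--         return []
--     grouped = {}
--     for x, y in points:
--         grouped.setdefault(y, []).append(x)
--     sorted_pts = []
--     for y in sorted(grouped.keys()):
--         xs = sorted(grouped[y])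
--         if y % 2 == 0:
--             sorted_pts.extend([(x, y) for x in xs])
--         else:
--             sorted_pts.extend([(x, y) for x in reversed(xs)])
--     return sorted_pts
-- ===== SOURCE B (Python) =====
-- from typing import List, Tuple
--
-- def _snake_sort_points(points: List[Tuple[int, int]]) -> List[Tuple[int, int]]:
--     # One global stable sort with a composite key: rows by y ascending,
--     # x ascending on even rows and descending (via -x) on odd rows.
--     return sorted(points, key=lambda p: (p[1], p[0] if p[1] % 2 == 0 else -p[0]))
-- ===== Notes on version B (the rewrite author's own statement) =====
-- stated objective: simpler
-- what changed: Replaces the dict-grouping, per-row sort and odd-row reverse with a single sorted() call using a composite key (y, x or -x depending on row parity).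
import Mathlib
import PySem

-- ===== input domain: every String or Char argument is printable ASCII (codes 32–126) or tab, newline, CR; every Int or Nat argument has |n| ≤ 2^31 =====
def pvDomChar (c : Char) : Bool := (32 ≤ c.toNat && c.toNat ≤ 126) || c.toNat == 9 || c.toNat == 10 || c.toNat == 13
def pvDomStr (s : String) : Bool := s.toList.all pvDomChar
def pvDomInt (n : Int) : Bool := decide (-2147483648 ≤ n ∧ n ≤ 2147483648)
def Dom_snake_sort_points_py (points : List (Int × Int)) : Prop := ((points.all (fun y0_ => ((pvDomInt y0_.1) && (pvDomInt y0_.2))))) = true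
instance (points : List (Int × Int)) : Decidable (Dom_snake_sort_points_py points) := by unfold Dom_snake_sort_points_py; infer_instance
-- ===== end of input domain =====

-- B replaces A's dict-grouping + per-row sort + odd-row reverse by ONE sorted() call
-- with the composite key (y, x if y even else -x); objective: simpler.

-- ===== PORT A =====
def snake_sort_points_py (points : List (Int × Int)) : List (Int × Int) :=
  if points = [] then []
  else
    let grouped : PySem.Dict Int (List Int) :=
      points.foldl (fun d p => d.modify p.2 [] (fun xs => xs ++ [p.1])) PySem.Dict.empty
    (PySem.List.sorted grouped.keys (fun y => y)).foldl
      (fun sorted_pts y =>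
        let xs := PySem.List.sorted (grouped.getD y []) (fun x => x)
        if PySem.Int.mod y 2 == 0 then
          sorted_pts ++ xs.map (fun x => (x, y))
        else
          sorted_pts ++ xs.reverse.map (fun x => (x, y)))
      []

-- ===== PORT B =====
def snake_sort_points_py_alt (points : List (Int × Int)) : List (Int × Int) :=
  PySem.List.sorted2 points (fun p => p.2)
    (fun p => if PySem.Int.mod p.2 2 == 0 then p.1 else -p.1)

-- ===== PRECONDITION & SPEC =====
def Spec_snake_sort_points_py (points : List (Int × Int)) (out : List (Int × Int)) : Prop := out = snake_sort_points_py_alt points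
instance (points : List (Int × Int)) (out : List (Int × Int)) : Decidable (Spec_snake_sort_points_py points out) := by unfold Spec_snake_sort_points_py; infer_instance

-- ===== CLAIM (what is proved, stated in full; the proofs are below) =====
def Claim_equal_snake_sort_points_py : Prop := ∀ (points : List (Int × Int)), Dom_snake_sort_points_py points → Spec_snake_sort_points_py points (snake_sort_points_py points)

-- ===== LEMMAS AND PROOFS =====

-- the composite snake key, as a value in the lexicographic order on pairs
def snakeKey (p : Int × Int) : Lex (Int × Int) :=
  toLex (p.2, if PySem.Int.mod p.2 2 == 0 then p.1 else -p.1)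

theorem snakeKey_injective : Function.Injective snakeKey := by
  intro p q h
  unfold snakeKey at h
  have h' := toLex.injective h
  have h2 : p.2 = q.2 := congrArg Prod.fst h'
  have h1 := congrArg Prod.snd h'
  simp only at h1
  rw [h2] at h1
  by_cases hm : PySem.Int.mod q.2 2 == 0 <;> simp only [hm, if_pos, if_neg, Bool.not_eq_true] at h1 <;>
    exact Prod.ext (by omega) h2

-- sorted2 with two Int keys is sorted with the lexicographic-pair key
theorem sorted2_eq_sorted_lex (xs : List (Int × Int)) (k1 k2 : (Int × Int) → Int) :
    PySem.List.sorted2 xs k1 k2 = PySem.List.sorted xs (fun x => toLex (k1 x, k2 x)) := by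
  show xs.foldl (fun acc x => PySem.List.insertBy
      (fun a b => decide (k1 a < k1 b) || (!decide (k1 b < k1 a) && decide (k2 a < k2 b))) x acc) [] =
    xs.foldl (fun acc x => PySem.List.insertBy
      (fun a b => decide (toLex (k1 a, k2 a) < toLex (k1 b, k2 b))) x acc) []
  have hb : (fun (a b : Int × Int) => decide (k1 a < k1 b) || (!decide (k1 b < k1 a) && decide (k2 a < k2 b))) =
      (fun a b => decide (toLex (k1 a, k2 a) < toLex (k1 b, k2 b))) := by
    funext a b
    by_cases h1 : k1 a < k1 b <;> by_cases h2 : k1 b < k1 a <;> by_cases h3 : k2 a < k2 b <;>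
      simp [h1, h2, h3, Prod.Lex.toLex_lt_toLex] <;> omega
  rw [hb]

theorem flatMap_filter_snd_perm (ys : List Int) (points : List (Int × Int))
    (hnd : ys.Nodup) (hcov : ∀ p ∈ points, p.2 ∈ ys) :
    (ys.flatMap (fun y => points.filter (fun p => p.2 == y))).Perm points := by
  induction ys generalizing points with
  | nil =>
      have : points = [] := List.eq_nil_iff_forall_not_mem.2 (fun p hp => by simpa using hcov p hp)
      simp [this]
  | cons y ys ih =>
      rw [List.flatMap_cons]
      have hrest : ∀ y' ∈ ys, points.filter (fun p => p.2 == y') =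
          (points.filter (fun p => !(p.2 == y))).filter (fun p => p.2 == y') := by
        intro y' hy'
        have hne : y' ≠ y := fun h => (List.nodup_cons.1 hnd).1 (h ▸ hy')
        rw [List.filter_filter]
        apply List.filter_congr
        intro p _
        by_cases h : p.2 = y' <;> simp [h, hne]
      have hflat : ys.flatMap (fun y' => points.filter (fun p => p.2 == y')) =
          ys.flatMap (fun y' => (points.filter (fun p => !(p.2 == y))).filter (fun p => p.2 == y')) := by
        apply List.flatMap_congr
        intro y' hy'
        exact hrest y' hy'
      rw [hflat]
      have hcov' : ∀ p ∈ points.filter (fun p => !(p.2 == y)), p.2 ∈ ys := by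
        intro p hp
        have h1 := List.of_mem_filter hp
        have h2 := hcov p (List.mem_of_mem_filter hp)
        simp at h1
        rcases List.mem_cons.1 h2 with h | h
        · exact absurd h h1
        · exact h
      have := ih (points.filter (fun p => !(p.2 == y))) (List.nodup_cons.1 hnd).2 hcov'
      exact (List.Perm.append_left _ this).trans (List.filter_append_perm _ points)

theorem perm_flatMap_of_forall_perm {α β : Type} (l : List α) (f g : α → List β)
    (h : ∀ a ∈ l, (f a).Perm (g a)) : (l.flatMap f).Perm (l.flatMap g) := by
  induction l with
  | nil => simp
  | cons a l ih =>
      simp only [List.flatMap_cons]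
      exact (h a (by simp)).append (ih (fun a ha => h a (by simp [ha])))

-- abbreviation used only in the proofs: the row A emits for a given y
def pvRow (points : List (Int × Int)) (y : Int) : List (Int × Int) :=
  let xs := PySem.List.sorted ((points.filter (fun p => p.2 == y)).map (fun p => p.1)) (fun x => x)
  if PySem.Int.mod y 2 == 0 then xs.map (fun x => (x, y)) else xs.reverse.map (fun x => (x, y))

theorem mem_pvRow_snd {points : List (Int × Int)} {y : Int} {q : Int × Int}
    (h : q ∈ pvRow points y) : q.2 = y := by
  unfold pvRow at h
  split at h <;> simp at h <;> obtain ⟨x, _, hx⟩ := h <;> simp [← hx]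

theorem pvRow_perm (points : List (Int × Int)) (y : Int) :
    (pvRow points y).Perm (points.filter (fun p => p.2 == y)) := by
  unfold pvRow
  have hxs : (PySem.List.sorted ((points.filter (fun p => p.2 == y)).map (fun p => p.1)) (fun x => x)).Perm
      ((points.filter (fun p => p.2 == y)).map (fun p => p.1)) := PySem.List.sorted_perm _ _ _
  have hback : List.map (fun x => (x, y)) (List.map (fun p => p.1) (points.filter (fun p => p.2 == y))) =
      points.filter (fun p => p.2 == y) := by
    rw [List.map_map]
    have hpt : ∀ p ∈ points.filter (fun p => p.2 == y),
        ((fun x => (x, y)) ∘ (fun p : Int × Int => p.1)) p = id p := by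
      intro p hp
      have := List.of_mem_filter hp
      simp at this
      simp only [Function.comp, id]
      rw [← this]
    rw [List.map_congr_left hpt, List.map_id]
  split
  · have h := hxs.map (fun x => (x, y)); rw [hback] at h; exact h
  · have h := ((List.reverse_perm _).trans hxs).map (fun x => (x, y))
    rw [hback] at h; exact h

theorem pvRow_pairwise (points : List (Int × Int)) (y : Int) :
    (pvRow points y).Pairwise (fun a b => snakeKey a ≤ snakeKey b) := by
  unfold pvRow
  have hs := PySem.List.sorted_pairwise ((points.filter (fun p => p.2 == y)).map (fun p => p.1)) (fun x => x)
  by_cases hm : PySem.Int.mod y 2 == 0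
  · rw [if_pos hm]
    rw [List.pairwise_map]
    refine hs.imp (fun {a b} hab => ?_)
    unfold snakeKey
    rw [Prod.Lex.toLex_le_toLex]
    right
    have hm' : (2:Int) ∣ y := by simp at hm; exact hm
    exact ⟨rfl, by simp [hm']; omega⟩
  · rw [if_neg hm]
    rw [List.pairwise_map, List.pairwise_reverse]
    refine hs.imp (fun {a b} hab => ?_)
    unfold snakeKey
    rw [Prod.Lex.toLex_le_toLex]
    right
    have hm' : ¬ (2:Int) ∣ y := by simp at hm; omega
    exact ⟨rfl, by simp [hm']; omega⟩

-- ===== VERDICT (by name: the statement is the Claim_ definition above) =====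
theorem snake_sort_points_py_spec : Claim_equal_snake_sort_points_py := by
  intro points _
  unfold Spec_snake_sort_points_py
  rw [snake_sort_points_py_alt, sorted2_eq_sorted_lex]
  have hkey : (fun x : Int × Int => toLex (x.2, if PySem.Int.mod x.2 2 == 0 then x.1 else -x.1)) = snakeKey := by
    funext p; rfl
  rw [hkey]
  by_cases hnil : points = []
  · subst hnil; rfl
  -- A's output, rewritten as a flatMap of rows over the sorted distinct y's
  have hgrouped : ∀ y : Int,
      (points.foldl (fun d p => d.modify p.2 [] (fun xs => xs ++ [p.1])) PySem.Dict.empty).getD y [] =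
      (points.filter (fun p => p.2 == y)).map (fun p => p.1) := by
    intro y
    have hm : points.foldl (fun d p => d.modify p.2 [] (fun xs => xs ++ [p.1])) PySem.Dict.empty =
        (points.map (fun p => (p.2, p.1))).foldl (fun d q => d.modify q.1 [] (fun xs => xs ++ [q.2])) PySem.Dict.empty := by
      rw [List.foldl_map]
    rw [hm, PySem.Dict.getD_foldl_modify_append]
    simp [List.filter_map]
    rfl
  have hkeys : (points.foldl (fun d p => d.modify p.2 [] (fun xs => xs ++ [p.1])) PySem.Dict.empty).keys =
      PySem.Set.ofList (points.map (fun p => p.2)) := by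
    rw [PySem.Dict.keys_foldl_modify_key points (fun p => p.2) [] (fun _ p => fun xs => xs ++ [p.1])]
    rfl
  set ys := PySem.List.sorted (PySem.Set.ofList (points.map (fun p => p.2))) (fun x => x) with hys
  have hA : snake_sort_points_py points = ys.flatMap (pvRow points) := by
    rw [snake_sort_points_py, if_neg hnil]
    simp only [hkeys, hgrouped]
    have hbody : (fun (sorted_pts : List (Int × Int)) (y : Int) =>
        if PySem.Int.mod y 2 == 0 then
          sorted_pts ++ (PySem.List.sorted ((points.filter (fun p => p.2 == y)).map (fun p => p.1)) (fun x => x)).map (fun x => (x, y))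
        else
          sorted_pts ++ (PySem.List.sorted ((points.filter (fun p => p.2 == y)).map (fun p => p.1)) (fun x => x)).reverse.map (fun x => (x, y))) =
        (fun sorted_pts y => sorted_pts ++ pvRow points y) := by
      funext acc y
      unfold pvRow
      split <;> rfl
    rw [hbody, PySem.List.foldl_append_eq_flatMap]
    rfl
  -- facts about ys
  have hlt : ys.Pairwise (fun a b => a < b) := PySem.List.sorted_ofList_pairwise_lt _
  have hnd : ys.Nodup := hlt.imp (fun {a b} h => ne_of_lt h)
  have hcov : ∀ p ∈ points, p.2 ∈ ys := by
    intro p hp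
    rw [hys, PySem.List.mem_sorted, PySem.Set.mem_ofList]
    exact List.mem_map_of_mem hp
  -- A's output is a permutation of points
  have hApermF : (ys.flatMap (pvRow points)).Perm (ys.flatMap (fun y => points.filter (fun p => p.2 == y))) :=
    perm_flatMap_of_forall_perm ys _ _ (fun y _ => pvRow_perm points y)
  have hAperm : (snake_sort_points_py points).Perm points := by
    rw [hA]
    exact hApermF.trans (flatMap_filter_snd_perm ys points hnd hcov)
  -- A's output is sorted under snakeKey
  have hApw : (snake_sort_points_py points).Pairwise (fun a b => snakeKey a ≤ snakeKey b) := by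
    rw [hA]
    rw [List.pairwise_flatMap]
    constructor
    · intro y _; exact pvRow_pairwise points y
    · apply hlt.imp
      intro y1 y2 h12 a ha b hb
      have ha2 := mem_pvRow_snd ha
      have hb2 := mem_pvRow_snd hb
      unfold snakeKey
      rw [Prod.Lex.toLex_le_toLex]
      left
      rw [ha2, hb2]
      exact h12
  -- B's output: sorted of points under the same key
  have hBperm : (PySem.List.sorted points snakeKey).Perm points := PySem.List.sorted_perm _ _ _
  have hBpw : (PySem.List.sorted points snakeKey).Pairwise (fun a b => snakeKey a ≤ snakeKey b) :=
    PySem.List.sorted_pairwise _ _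
  exact PySem.List.eq_of_perm_of_pairwise_le_of_injective snakeKey snakeKey_injective
    (hAperm.trans hBperm.symm) hApw hBpw
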